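-- pv_equiv track=rewrite | github.com/pypi-data/pypi-mirror-368 | packages/textbasic/textbasic-0.1.7.tar.gz/textbasic-0.1.7/textbasic/basic/preprocessor.py | _remove_line_by_junk
-- ===== SOURCE A (Python) =====
-- def _remove_line_by_junk(string, junk_list):
--     string = str(string)
--     string_split_list = string.split('\n')
--
--     temp_list = []
--     for ss in string_split_list:
--
--         # junk 단어 포함되어있을 시 해당 line 삭제
--         for junk in junk_list:
--             if junk in ss:
--                 ss = ''
--                 break
--         temp_list.append(ss)
--
--     # result_string_list = list(map(lambda x: remove_junk_line(x, junk_list), result_string_list))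
--     result_string = '\n'.join(temp_list)
--     return result_string
-- ===== SOURCE B (Python) =====
-- def _keep(line, junk_list):
--     return '' if any(j in line for j in junk_list) else line
--
-- def _remove_line_by_junk(string, junk_list):
--     # single pass over the characters: no split/join round-trip
--     string = str(string)
--     parts = []
--     line = []
--     for ch in string:
--         if ch == '\n':
--             parts.append(_keep(''.join(line), junk_list))
--             parts.append('\n')
--             line = []
--         else:
--             line.append(ch)
--     parts.append(_keep(''.join(line), junk_list))
--     return ''.join(parts)
-- ===== Notes on version B (the rewrite author's own statement) =====
-- stated objective: alternative
-- what changed: B replaces A's split('\n') / per-line loop / '\n'.join round-trip by a single character-level scan that accumulates the current line and flushes it (blanked or kept) at each newline, building the output directly.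
import Mathlib
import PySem

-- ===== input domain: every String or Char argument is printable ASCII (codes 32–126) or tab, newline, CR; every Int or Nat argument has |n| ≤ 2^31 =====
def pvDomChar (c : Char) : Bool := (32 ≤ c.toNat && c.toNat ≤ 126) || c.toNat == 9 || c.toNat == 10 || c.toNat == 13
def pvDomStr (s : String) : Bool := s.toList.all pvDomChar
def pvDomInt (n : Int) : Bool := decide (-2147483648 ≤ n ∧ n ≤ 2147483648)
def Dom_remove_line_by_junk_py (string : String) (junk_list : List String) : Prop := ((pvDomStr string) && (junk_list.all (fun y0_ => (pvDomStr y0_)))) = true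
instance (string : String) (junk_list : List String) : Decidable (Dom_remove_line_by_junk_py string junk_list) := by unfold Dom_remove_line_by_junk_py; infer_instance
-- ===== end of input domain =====

-- B replaces A's split/per-line-loop/join pipeline by a single character-level scan that
-- flushes each line (blanked if it contains any junk substring) directly into the output.


-- ===== PORT A =====
-- inner 'for junk in junk_list: if junk in ss: ss = ''; break'
def blankLoopA : List String → List Char → List Char
  | [], ss => ss
  | junk :: rest, ss =>
      if PySem.Chars.isIn junk.toList ss then [] else blankLoopA rest ss

def remove_line_by_junk_py (string : String) (junk_list : List String) : String :=
  let string_split_list := PySem.Chars.splitOn string.toList ['\n']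
  let temp_list := string_split_list.foldl (fun acc ss => acc ++ [blankLoopA junk_list ss]) []
  String.mk (PySem.Chars.join ['\n'] temp_list)

-- ===== PORT B =====
def keepB (junk_list : List String) (line : List Char) : List Char :=
  if junk_list.any (fun j => PySem.Chars.isIn j.toList line) then [] else line

def scanB (junk_list : List String) (line : List Char) : List Char → List Char
  | [] => keepB junk_list line
  | c :: rest =>
      if c = '\n' then keepB junk_list line ++ '\n' :: scanB junk_list [] rest
      else scanB junk_list (line ++ [c]) rest

def remove_line_by_junk_py_alt (string : String) (junk_list : List String) : String :=
  String.mk (scanB junk_list [] string.toList)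

-- ===== PRECONDITION & SPEC =====
def Spec_remove_line_by_junk_py (string : String) (junk_list : List String) (out : String) : Prop := out = remove_line_by_junk_py_alt string junk_list
instance (string : String) (junk_list : List String) (out : String) : Decidable (Spec_remove_line_by_junk_py string junk_list out) := by unfold Spec_remove_line_by_junk_py; infer_instance

-- ===== CLAIM (what is proved, stated in full; the proofs are below) =====
def Claim_equal_remove_line_by_junk_py : Prop := ∀ (string : String) (junk_list : List String), Dom_remove_line_by_junk_py string junk_list → Spec_remove_line_by_junk_py string junk_list (remove_line_by_junk_py string junk_list)

-- ===== LEMMAS AND PROOFS =====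

-- structural splitter on '\n', the common reference
def mySplit : List Char → List (List Char)
  | [] => [[]]
  | c :: rest =>
      if c = '\n' then [] :: mySplit rest
      else match mySplit rest with
        | p :: ps => (c :: p) :: ps
        | [] => [[c]]

lemma mySplit_ne_nil (cs : List Char) : mySplit cs ≠ [] := by
  cases cs with
  | nil => simp [mySplit]
  | cons c rest =>
      simp only [mySplit]
      split
      · simp
      · cases h : mySplit rest <;> simp

def consHead (x : List Char) : List (List Char) → List (List Char)
  | [] => [x]
  | p :: ps => (x ++ p) :: ps

lemma splitOn_go_spec (l : List Char) (fuel : Nat) (cur : List Char) (acc : List (List Char))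
    (h : l.length ≤ fuel) :
    PySem.Chars.splitOn.go ['\n'] fuel l cur acc
      = acc.reverse ++ consHead cur.reverse (mySplit l) := by
  induction fuel generalizing l cur acc with
  | zero =>
      have : l = [] := List.length_eq_zero_iff.mp (Nat.le_zero.mp h)
      subst this
      simp [PySem.Chars.splitOn.go, mySplit, consHead]
  | succ fuel ih =>
      cases l with
      | nil => simp [PySem.Chars.splitOn.go, mySplit, consHead]
      | cons c rest =>
          simp only [PySem.Chars.splitOn.go]
          by_cases hc : c = '\n'
          · subst hc
            rw [if_pos (by simp)]
            have hrec := ih rest [] ((cur.reverse) :: acc) (by simpa using Nat.le_of_succ_le_succ h)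
            simp only [List.length_cons, List.length_nil, List.drop_succ_cons, List.drop_zero]
            rw [hrec]
            have hm := mySplit_ne_nil rest
            cases hms : mySplit rest with
            | nil => exact absurd hms hm
            | cons p ps =>
                simp [mySplit, hms, consHead]
          · rw [if_neg (by simp; exact fun h => hc h.symm)]
            have := ih rest (c :: cur) acc (by simpa using Nat.le_of_succ_le_succ h)
            rw [this]
            have hm := mySplit_ne_nil rest
            cases hms : mySplit rest with
            | nil => exact absurd hms hm
            | cons p ps =>
                simp [mySplit, hms, hc, consHead]

lemma splitOn_eq_mySplit (cs : List Char) :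
    PySem.Chars.splitOn cs ['\n'] = mySplit cs := by
  have := splitOn_go_spec cs (cs.length + 1) [] [] (by omega)
  simp only [PySem.Chars.splitOn, this]
  have hm := mySplit_ne_nil cs
  cases hms : mySplit cs with
  | nil => exact absurd hms hm
  | cons p ps => simp [consHead]

lemma blankLoopA_eq_keepB (junk_list : List String) (ss : List Char) :
    blankLoopA junk_list ss = keepB junk_list ss := by
  induction junk_list with
  | nil => simp [blankLoopA, keepB]
  | cons j rest ih =>
      simp only [blankLoopA, keepB, List.any_cons]
      by_cases h : PySem.Chars.isIn j.toList ss = true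
      · simp [h]
      · simp [h, ih, keepB]

lemma foldl_append_singleton {α β : Type} (f : α → β) (xs : List α) (acc : List β) :
    xs.foldl (fun a x => a ++ [f x]) acc = acc ++ xs.map f := by
  induction xs generalizing acc with
  | nil => simp
  | cons x xs ih => simp [ih]

lemma intercalate_cons_cons (sep a b : List Char) (rest : List (List Char)) :
    sep.intercalate (a :: b :: rest) = a ++ sep ++ sep.intercalate (b :: rest) := by
  simp [List.intercalate, List.intersperse]

lemma scanB_spec (junk_list : List String) (cs line : List Char) :
    scanB junk_list line cs
      = PySem.Chars.join ['\n'] ((consHead line (mySplit cs)).map (keepB junk_list)) := by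
  induction cs generalizing line with
  | nil => simp [scanB, mySplit, consHead, PySem.Chars.join, List.intercalate]
  | cons c rest ih =>
      by_cases hc : c = '\n'
      · subst hc
        have hm := mySplit_ne_nil rest
        cases hms : mySplit rest with
        | nil => exact absurd hms hm
        | cons p ps =>
            have ihh := ih []
            rw [hms] at ihh
            simp [scanB, mySplit, hms, consHead, PySem.Chars.join, intercalate_cons_cons, ihh]
      · have hm := mySplit_ne_nil rest
        cases hms : mySplit rest with
        | nil => exact absurd hms hm
        | cons p ps =>
            have ihh := ih (line ++ [c])
            rw [hms] at ihh
            simp [scanB, mySplit, hms, hc, consHead, ihh]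

-- ===== VERDICT (by name: the statement is the Claim_ definition above) =====
theorem remove_line_by_junk_py_spec : Claim_equal_remove_line_by_junk_py := by
  intro s junk_list _
  have hfun : blankLoopA junk_list = keepB junk_list := funext (blankLoopA_eq_keepB junk_list)
  show remove_line_by_junk_py s junk_list = remove_line_by_junk_py_alt s junk_list
  show String.mk (PySem.Chars.join ['\n']
      ((PySem.Chars.splitOn s.toList ['\n']).foldl (fun acc ss => acc ++ [blankLoopA junk_list ss]) []))
    = String.mk (scanB junk_list [] s.toList)
  rw [splitOn_eq_mySplit, foldl_append_singleton, scanB_spec]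
  have hm := mySplit_ne_nil s.toList
  cases hms : mySplit s.toList with
  | nil => exact absurd hms hm
  | cons p ps =>
      simp [consHead, hfun]
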